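-- pv_equiv track=rewrite | github.com/Leiner117/Prueba-corta-2 | Ejercicio3.py | descifrarNumero
-- ===== SOURCE A (Python) =====
-- def descifrarNumero(num,claveCifrado):
--     num=num//10
--     res=0
--     cont=0
--     while num>0:
--         res = (10**cont)*((((num%10)-claveCifrado))+10)+res
--         cont+=1
--         num = num//10
--     return res
-- ===== SOURCE B (Python) =====
-- def descifrarNumero(num, claveCifrado):
--     m = num // 10
--     if m <= 0:
--         return 0
--     # closed form: each digit d becomes d - claveCifrado + 10, so the result is
--     # m + (10 - claveCifrado) * repunit(number of digits of m)
--     rep = 0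
--     t = m
--     while t > 0:
--         rep = rep * 10 + 1
--         t //= 10
--     return m + (10 - claveCifrado) * rep
-- ===== Notes on version B (the rewrite author's own statement) =====
-- stated objective: simpler
-- what changed: A accumulates each transformed digit weighted by an explicit 10**cont; B uses the algebraic identity that the result equals m + (10 - claveCifrado) * repunit(#digits of m) (m = num//10), so its loop only builds the repunit and one arithmetic expression finishes the job.
import Mathlib
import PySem

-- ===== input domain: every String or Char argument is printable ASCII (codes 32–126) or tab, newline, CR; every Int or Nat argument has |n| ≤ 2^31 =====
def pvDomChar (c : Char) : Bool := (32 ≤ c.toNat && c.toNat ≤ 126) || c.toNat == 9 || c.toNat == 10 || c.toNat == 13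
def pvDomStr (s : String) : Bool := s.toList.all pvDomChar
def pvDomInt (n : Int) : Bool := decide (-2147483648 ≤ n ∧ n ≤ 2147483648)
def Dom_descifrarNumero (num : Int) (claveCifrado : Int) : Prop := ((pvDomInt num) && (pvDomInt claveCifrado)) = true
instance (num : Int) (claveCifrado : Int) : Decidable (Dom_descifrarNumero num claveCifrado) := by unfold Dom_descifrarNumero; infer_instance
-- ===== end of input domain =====

-- B replaces A's per-digit accumulation with the closed form m + (10 - key) * repunit(number of digits of m); objective: simpler.

-- termination helper for the //10 loops (cited by the decreasing_by of both ports)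
theorem pvFdiv10_toNat_lt (t : Int) (h : 0 < t) :
    (PySem.Int.floordiv t 10).toNat < t.toNat := by
  rw [PySem.Int.floordiv_eq_ediv_of_pos (by omega)]
  have h1 : t / 10 < t := by
    have := Int.ediv_lt_iff_lt_mul (a := t) (b := t) (c := 10) (by omega)
    omega
  have h2 : 0 ≤ t / 10 := Int.ediv_nonneg (by omega) (by omega)
  omega

-- ===== PORT A =====
-- the while loop of A, state (num, res, cont)
def descLoop (claveCifrado num res : Int) (cont : Nat) : Int :=
  if h : num > 0 then
    descLoop claveCifrado (PySem.Int.floordiv num 10)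
      ((10 : Int) ^ cont * ((PySem.Int.mod num 10 - claveCifrado) + 10) + res) (cont + 1)
  else res
termination_by num.toNat
decreasing_by exact pvFdiv10_toNat_lt num h

def descifrarNumero (num : Int) (claveCifrado : Int) : Int :=
  descLoop claveCifrado (PySem.Int.floordiv num 10) 0 0

-- ===== PORT B =====
-- the repunit-building loop of B, state (rep, t)
def repLoop (rep t : Int) : Int :=
  if h : t > 0 then repLoop (rep * 10 + 1) (PySem.Int.floordiv t 10) else rep
termination_by t.toNat
decreasing_by exact pvFdiv10_toNat_lt t h

def descifrarNumero_alt (num : Int) (claveCifrado : Int) : Int :=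
  let m := PySem.Int.floordiv num 10
  if m ≤ 0 then 0
  else m + (10 - claveCifrado) * repLoop 0 m

-- ===== PRECONDITION & SPEC =====
def Spec_descifrarNumero (num : Int) (claveCifrado : Int) (out : Int) : Prop := out = descifrarNumero_alt num claveCifrado
instance (num : Int) (claveCifrado : Int) (out : Int) : Decidable (Spec_descifrarNumero num claveCifrado out) := by unfold Spec_descifrarNumero; infer_instance

-- ===== CLAIM (what is proved, stated in full; the proofs are below) =====
def Claim_equal_descifrarNumero : Prop := ∀ (num : Int) (claveCifrado : Int), Dom_descifrarNumero num claveCifrado → Spec_descifrarNumero num claveCifrado (descifrarNumero num claveCifrado)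

-- ===== LEMMAS AND PROOFS =====

-- pure repunit of the digit count of t
def repOf (t : Int) : Int :=
  if h : t > 0 then 10 * repOf (PySem.Int.floordiv t 10) + 1 else 0
termination_by t.toNat
decreasing_by exact pvFdiv10_toNat_lt t h

-- 10 ^ (digit count of t)
def tenPow (t : Int) : Int :=
  if h : t > 0 then 10 * tenPow (PySem.Int.floordiv t 10) else 1
termination_by t.toNat
decreasing_by exact pvFdiv10_toNat_lt t h

theorem repOf_pos {t : Int} (h : t > 0) :
    repOf t = 10 * repOf (PySem.Int.floordiv t 10) + 1 := by
  rw [repOf]; exact dif_pos h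

theorem repOf_nonpos {t : Int} (h : ¬ t > 0) : repOf t = 0 := by
  rw [repOf]; exact dif_neg h

theorem tenPow_pos {t : Int} (h : t > 0) :
    tenPow t = 10 * tenPow (PySem.Int.floordiv t 10) := by
  rw [tenPow]; exact dif_pos h

theorem tenPow_nonpos {t : Int} (h : ¬ t > 0) : tenPow t = 1 := by
  rw [tenPow]; exact dif_neg h

theorem tenPow_eq (t : Int) : tenPow t = 9 * repOf t + 1 := by
  induction t using tenPow.induct with
  | case1 t h ih => rw [tenPow_pos h, repOf_pos h, ih]; ring
  | case2 t h => rw [tenPow_nonpos h, repOf_nonpos h]; ring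

theorem repLoop_eq (t : Int) : ∀ rep : Int, repLoop rep t = rep * tenPow t + repOf t := by
  induction t using repOf.induct with
  | case1 t h ih =>
    intro rep
    rw [repLoop, dif_pos h, ih, tenPow_pos h, repOf_pos h,
      tenPow_eq (PySem.Int.floordiv t 10)]
    ring
  | case2 t h =>
    intro rep
    rw [repLoop, dif_neg h, tenPow_nonpos h, repOf_nonpos h]; ring

theorem descLoop_eq (c m : Int) (hm : 0 ≤ m) : ∀ (res : Int) (cont : Nat),
    descLoop c m res cont = res + (10 : Int) ^ cont * (m + (10 - c) * repOf m) := by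
  induction m using repOf.induct with
  | case1 m h ih =>
    intro res cont
    have hq : 0 ≤ PySem.Int.floordiv m 10 := by
      rw [PySem.Int.floordiv_eq_ediv_of_pos (by omega)]
      exact Int.ediv_nonneg (by omega) (by omega)
    rw [descLoop, dif_pos h, ih hq, repOf_pos h]
    have hfm := PySem.Int.floordiv_mul_add_mod m 10
    set q := PySem.Int.floordiv m 10
    set r := PySem.Int.mod m 10
    have hm' : m = q * 10 + r := hfm.symm
    rw [hm', pow_succ]
    ring
  | case2 m h =>
    intro res cont
    have hm0 : m = 0 := by omega
    rw [descLoop, dif_neg h, repOf_nonpos h, hm0]; ring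

theorem descifrarNumero_eq_alt (num c : Int) :
    descifrarNumero num c = descifrarNumero_alt num c := by
  unfold descifrarNumero descifrarNumero_alt
  set m := PySem.Int.floordiv num 10 with hm
  by_cases h : m ≤ 0
  · rw [descLoop, dif_neg (by omega), if_pos h]
  · rw [descLoop_eq c m (by omega), if_neg h, repLoop_eq, pow_zero]
    ring

-- ===== VERDICT (by name: the statement is the Claim_ definition above) =====
theorem descifrarNumero_spec : Claim_equal_descifrarNumero := by
  intro num c _
  unfold Spec_descifrarNumero
  exact descifrarNumero_eq_alt num c
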